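-- pv_equiv track=rewrite | github.com/ericcolton/advent-of-code | 2020/aoc_2020_09/aoc_2020_09.py | validate_index
-- ===== SOURCE A (Python) =====
-- def validate_index(index: int, data: list, preamble_length: int) -> bool:
--     if index >= len(data) or preamble_length >= len(data):
--         return False
--     if index < preamble_length:
--         return True
--     for i in range(index - preamble_length, index - 1):
--         for j in range(i + 1, index):
--             if data[i] + data[j] == data[index]:
--                 return True
--     return False
-- ===== SOURCE B (Python) =====
-- def validate_index(index: int, data: list, preamble_length: int) -> bool:
--     n = len(data)
--     if index >= n or preamble_length >= n:
--         return False
--     if index < preamble_length: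
--         return True
--     seen = set()
--     for k in range(index - preamble_length, index):
--         if data[index] - data[k] in seen:
--             return True
--         seen.add(data[k])
--     return False
-- ===== Notes on version B (the rewrite author's own statement) =====
-- stated objective: alternative
-- what changed: replaces A's nested scan over all index pairs of the window with a single pass that keeps a hash set of seen values and tests data[index]-data[k] membership
import Mathlib
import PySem

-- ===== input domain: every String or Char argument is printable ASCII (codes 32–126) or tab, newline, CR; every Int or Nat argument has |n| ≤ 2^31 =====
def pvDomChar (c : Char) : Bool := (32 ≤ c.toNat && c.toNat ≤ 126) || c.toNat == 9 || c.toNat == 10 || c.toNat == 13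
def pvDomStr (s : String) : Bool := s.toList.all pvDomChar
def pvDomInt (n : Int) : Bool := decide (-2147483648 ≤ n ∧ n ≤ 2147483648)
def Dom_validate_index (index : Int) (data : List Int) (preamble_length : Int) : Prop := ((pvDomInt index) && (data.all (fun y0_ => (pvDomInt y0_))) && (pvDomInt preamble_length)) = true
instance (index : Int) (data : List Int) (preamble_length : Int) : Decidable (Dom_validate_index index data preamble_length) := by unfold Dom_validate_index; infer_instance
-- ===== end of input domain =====

-- B replaces A's nested scan over index pairs of the window by a single pass with a
-- hash set of values seen so far (checking data[index]-data[k] membership).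

-- ===== PORT A =====
-- data[i] accesses are in range on every reachable evaluation (guarded by the two
-- leading ifs and the range bounds), so the total form pyGetD with default 0 is exact.
def validate_index (index : Int) (data : List Int) (preamble_length : Int) : Bool :=
  if index ≥ (data.length : Int) ∨ preamble_length ≥ (data.length : Int) then false
  else if index < preamble_length then true
  else
    (PySem.List.pyRange (index - preamble_length) (index - 1) 1).any (fun i =>
      (PySem.List.pyRange (i + 1) index 1).any (fun j =>
        PySem.List.pyGetD data i 0 + PySem.List.pyGetD data j 0 == PySem.List.pyGetD data index 0))

-- ===== PORT B =====
-- B-side helper: the single pass over the window indices, carrying the set of seen values.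
def viLoop (data : List Int) (index : Int) : List Int → PySem.Set Int → Bool
  | [], _ => false
  | k :: ks, seen =>
    if seen.contains (PySem.List.pyGetD data index 0 - PySem.List.pyGetD data k 0) then true
    else viLoop data index ks (seen.add (PySem.List.pyGetD data k 0))

def validate_index_alt (index : Int) (data : List Int) (preamble_length : Int) : Bool :=
  if index ≥ (data.length : Int) ∨ preamble_length ≥ (data.length : Int) then false
  else if index < preamble_length then true
  else
    viLoop data index (PySem.List.pyRange (index - preamble_length) index 1) PySem.Set.empty

-- ===== PRECONDITION & SPEC =====
def Spec_validate_index (index : Int) (data : List Int) (preamble_length : Int) (out : Bool) : Prop := out = validate_index_alt index data preamble_length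
instance (index : Int) (data : List Int) (preamble_length : Int) (out : Bool) : Decidable (Spec_validate_index index data preamble_length out) := by unfold Spec_validate_index; infer_instance

-- ===== CLAIM (what is proved, stated in full; the proofs are below) =====
def Claim_equal_validate_index : Prop := ∀ (index : Int) (data : List Int) (preamble_length : Int), Dom_validate_index index data preamble_length → Spec_validate_index index data preamble_length (validate_index index data preamble_length)

-- ===== LEMMAS AND PROOFS =====

-- Characterisation of B's loop over a contiguous index range.
theorem viLoop_range_iff (data : List Int) (index : Int) :
    ∀ (n : Nat) (s : Int) (seen : PySem.Set Int), (index - s).toNat ≤ n →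
    (viLoop data index (PySem.List.pyRange s index 1) seen = true ↔
      ((∃ k, s ≤ k ∧ k < index ∧
          (PySem.List.pyGetD data index 0 - PySem.List.pyGetD data k 0) ∈ seen) ∨
       (∃ i j, s ≤ i ∧ i < j ∧ j < index ∧
          PySem.List.pyGetD data i 0 + PySem.List.pyGetD data j 0 =
            PySem.List.pyGetD data index 0))) := by
  intro n
  induction n with
  | zero =>
    intro s seen h
    have hle : index ≤ s := by omega
    rw [PySem.List.pyRange_one_eq_nil hle]
    simp only [viLoop]
    constructor
    · intro h'; cases h'
    · rintro (⟨k, hk1, hk2, _⟩ | ⟨i, j, hi, hij, hj, _⟩) <;> omega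
  | succ n ih =>
    intro s seen h
    by_cases hs : s < index
    · rw [PySem.List.pyRange_one_cons hs]
      simp only [viLoop]
      by_cases hc : seen.contains (PySem.List.pyGetD data index 0 - PySem.List.pyGetD data s 0)
      · simp only [hc, if_true]
        constructor
        · intro _
          exact Or.inl ⟨s, le_refl s, hs, by
            simpa using hc⟩
        · intro _; trivial
      · simp only [hc, Bool.false_eq_true, if_false]
        have hmem : ¬ (PySem.List.pyGetD data index 0 - PySem.List.pyGetD data s 0) ∈ seen := by
          simpa using hc
        rw [ih (s + 1) (seen.add (PySem.List.pyGetD data s 0)) (by omega)]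
        constructor
        · rintro (⟨k, hk1, hk2, hks⟩ | ⟨i, j, hi, hij, hj, hsum⟩)
          · rw [PySem.Set.mem_add] at hks
            rcases hks with hks | hks
            · exact Or.inl ⟨k, by omega, hk2, hks⟩
            · exact Or.inr ⟨s, k, le_refl s, by omega, hk2, by omega⟩
          · exact Or.inr ⟨i, j, by omega, hij, hj, hsum⟩
        · rintro (⟨k, hk1, hk2, hks⟩ | ⟨i, j, hi, hij, hj, hsum⟩)
          · rcases eq_or_lt_of_le hk1 with hk | hk
            · exact absurd (hk ▸ hks) hmem
            · exact Or.inl ⟨k, by omega, hk2, by rw [PySem.Set.mem_add]; exact Or.inl hks⟩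
          · rcases eq_or_lt_of_le hi with rfl | hi'
            · exact Or.inl ⟨j, by omega, hj, by
                rw [PySem.Set.mem_add]
                exact Or.inr (by omega)⟩
            · exact Or.inr ⟨i, j, by omega, hij, hj, hsum⟩
    · have hle : index ≤ s := by omega
      rw [PySem.List.pyRange_one_eq_nil hle]
      simp only [viLoop]
      constructor
      · intro h'; cases h'
      · rintro (⟨k, hk1, hk2, _⟩ | ⟨i, j, hi, hij, hj, _⟩) <;> omega

-- Characterisation of A's nested any.
theorem portA_core_iff (data : List Int) (index s : Int) :
    ((PySem.List.pyRange s (index - 1) 1).any (fun i =>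
      (PySem.List.pyRange (i + 1) index 1).any (fun j =>
        PySem.List.pyGetD data i 0 + PySem.List.pyGetD data j 0 ==
          PySem.List.pyGetD data index 0)) = true ↔
      (∃ i j, s ≤ i ∧ i < j ∧ j < index ∧
        PySem.List.pyGetD data i 0 + PySem.List.pyGetD data j 0 =
          PySem.List.pyGetD data index 0)) := by
  simp only [List.any_eq_true, PySem.List.mem_pyRange_one, beq_iff_eq]
  constructor
  · rintro ⟨i, ⟨hi1, hi2⟩, j, ⟨hj1, hj2⟩, hsum⟩
    exact ⟨i, j, hi1, by omega, hj2, hsum⟩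
  · rintro ⟨i, j, hi, hij, hj, hsum⟩
    exact ⟨i, ⟨hi, by omega⟩, j, ⟨by omega, hj⟩, hsum⟩

-- ===== VERDICT (by name: the statement is the Claim_ definition above) =====
theorem validate_index_spec : Claim_equal_validate_index := by
  unfold Claim_equal_validate_index
  intro index data preamble_length _
  unfold Spec_validate_index validate_index validate_index_alt
  split_ifs with h1 h2
  · rfl
  · rfl
  · rw [Bool.eq_iff_iff]
    rw [portA_core_iff data index (index - preamble_length)]
    rw [viLoop_range_iff data index (index - (index - preamble_length)).toNat
        (index - preamble_length) PySem.Set.empty (le_refl _)]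
    constructor
    · intro hp; exact Or.inr hp
    · rintro (⟨k, _, _, hks⟩ | hp)
      · simp [PySem.Set.empty] at hks
      · exact hp
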